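-- pv_equiv track=rewrite | github.com/lvlahdi/8-Queens-HillClimbing | game.py | findCaptures
-- ===== SOURCE A (Python) =====
-- def captureNum(columnList):
--     captureCounter = 0
--     for i in range(0, len(columnList) - 1):
--         for j in range(i + 1, len(columnList)):
--             if columnList[i] == columnList[j]:
--                 captureCounter += 1
--             if (columnList[i] - columnList[j]) == i - j or (columnList[i] - columnList[j]) == -(i - j): # BUG
--                 captureCounter += 1
--     return captureCounter
--
-- def findCaptures(columnList):
--     captureList = [[0 for i in range(8)] for i in range(8)]  # NOTE: list of locations where comparisons will be discarded
--     # BUG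
--     for m in range(8):
--         # to find smallest number of attacking queens number for next iteration, every location is tried therefore initial locations are kept
--         copyColumnList = columnList.copy()
--         for n in range(8):
--             if columnList[m] == n + 1:  # if queens are where they were before
--                 captureList[m][n] = captureNum(columnList)
--                 continue
--             elif copyColumnList[m] != n + 1:
--                 copyColumnList[m] = n + 1
--                 captureList[m][n] = captureNum(copyColumnList)
--     return captureList
-- ===== SOURCE B (Python) =====
-- def _pairCount(columnList):
--     # one linear pass: count attacking pairs sharing a row, a diagonal (v - j)
--     # or an anti-diagonal (v + j) using prefix tallies in dictionaries
--     rows = {}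
--     diags = {}
--     antis = {}
--     total = 0
--     for j, v in enumerate(columnList):
--         total += rows.get(v, 0) + diags.get(v - j, 0) + antis.get(v + j, 0)
--         rows[v] = rows.get(v, 0) + 1
--         diags[v - j] = diags.get(v - j, 0) + 1
--         antis[v + j] = antis.get(v + j, 0) + 1
--     return total
--
--
-- def _moved(columnList, m, v):
--     moved = columnList.copy()
--     moved[m] = v
--     return moved
--
--
-- def findCaptures(columnList):
--     return [[_pairCount(_moved(columnList, m, n + 1)) for n in range(8)]
--             for m in range(8)]
-- ===== Notes on version B (the rewrite author's own statement) =====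
-- stated objective: faster
-- what changed: The O(len^2) pairwise double loop counting attacking pairs is replaced by a single linear pass that tallies rows, diagonals (v-j) and anti-diagonals (v+j) in dictionaries, and the mutating copy/continue/elif move loop is replaced by a plain nested comprehension over copy-and-set boards.
import Mathlib
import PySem

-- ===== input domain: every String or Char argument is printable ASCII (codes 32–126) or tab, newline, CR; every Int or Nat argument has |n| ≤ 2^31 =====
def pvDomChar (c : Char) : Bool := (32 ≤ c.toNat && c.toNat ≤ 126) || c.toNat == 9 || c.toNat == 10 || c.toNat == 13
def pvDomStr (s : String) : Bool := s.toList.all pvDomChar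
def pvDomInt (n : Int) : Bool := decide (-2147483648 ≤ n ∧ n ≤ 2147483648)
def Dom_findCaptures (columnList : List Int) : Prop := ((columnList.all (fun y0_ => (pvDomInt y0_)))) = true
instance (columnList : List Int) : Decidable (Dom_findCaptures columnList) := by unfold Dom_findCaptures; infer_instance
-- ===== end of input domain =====

-- B replaces the quadratic pairwise capture count by one linear dictionary-tally pass
-- and the mutating copy/continue/elif move loop by a plain copy-and-set comprehension.


-- ===== PORT A =====
def captureNum (columnList : List Int) : Int :=
  (PySem.List.pyRange 0 ((columnList.length : Int) - 1)).foldl (fun cap i =>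
    (PySem.List.pyRange (i + 1) (columnList.length : Int)).foldl (fun cap j =>
      let cap := if PySem.List.pyGetD columnList i 0 == PySem.List.pyGetD columnList j 0 then cap + 1 else cap
      if (PySem.List.pyGetD columnList i 0 - PySem.List.pyGetD columnList j 0 == i - j)
          || (PySem.List.pyGetD columnList i 0 - PySem.List.pyGetD columnList j 0 == -(i - j))
      then cap + 1 else cap) cap) 0

-- indices m, n range over [0, 8) and Pre_ gives 8 ≤ length, so '.toNat' List.set is
-- exactly Python's in-range assignment captureList[m][n] = … / copyColumnList[m] = …
def findCaptures (columnList : List Int) : List (List Int) :=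
  (PySem.List.pyRange 0 8).foldl (fun captureList m =>
    ((PySem.List.pyRange 0 8).foldl (fun (st : List (List Int) × List Int) n =>
        if PySem.List.pyGetD columnList m 0 == n + 1 then
          (st.1.set m.toNat ((PySem.List.pyGetD st.1 m []).set n.toNat (captureNum columnList)), st.2)
        else if !(PySem.List.pyGetD st.2 m 0 == n + 1) then
          (st.1.set m.toNat ((PySem.List.pyGetD st.1 m []).set n.toNat (captureNum (st.2.set m.toNat (n + 1)))),
           st.2.set m.toNat (n + 1))
        else st)
      (captureList, columnList)).1)
    ((PySem.List.pyRange 0 8).map (fun _ => (PySem.List.pyRange 0 8).map (fun _ => (0 : Int))))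

-- ===== PORT B =====
def pairCount (columnList : List Int) : Int :=
  ((PySem.List.enumerate columnList).foldl
    (fun (st : (PySem.Dict Int Int × PySem.Dict Int Int × PySem.Dict Int Int) × Int) p =>
      ((st.1.1.insert p.2 (st.1.1.getD p.2 0 + 1),
        st.1.2.1.insert (p.2 - p.1) (st.1.2.1.getD (p.2 - p.1) 0 + 1),
        st.1.2.2.insert (p.2 + p.1) (st.1.2.2.getD (p.2 + p.1) 0 + 1)),
       st.2 + st.1.1.getD p.2 0 + st.1.2.1.getD (p.2 - p.1) 0 + st.1.2.2.getD (p.2 + p.1) 0))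
    ((PySem.Dict.empty, PySem.Dict.empty, PySem.Dict.empty), 0)).2

-- m ∈ [0, 8) and 8 ≤ length (Pre_), so '.toNat' List.set is Python's in-range moved[m] = v
def movedAt (columnList : List Int) (m : Int) (v : Int) : List Int :=
  columnList.set m.toNat v

def findCaptures_alt (columnList : List Int) : List (List Int) :=
  (PySem.List.pyRange 0 8).map (fun m =>
    (PySem.List.pyRange 0 8).map (fun n => pairCount (movedAt columnList m (n + 1))))

-- ===== PRECONDITION & SPEC =====
-- Python A indexes columnList[m] for m in range(8): IndexError (for both A and B) when the list is shorter.
def Pre_findCaptures (columnList : List Int) : Prop := 8 ≤ columnList.length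
instance (columnList : List Int) : Decidable (Pre_findCaptures columnList) := by unfold Pre_findCaptures; infer_instance
def pvWitness_findCaptures : List Int := [1, 2, 3, 4, 5, 6, 7, 8]

def Spec_findCaptures (columnList : List Int) (out : List (List Int)) : Prop := out = findCaptures_alt columnList
instance (columnList : List Int) (out : List (List Int)) : Decidable (Spec_findCaptures columnList out) := by unfold Spec_findCaptures; infer_instance

-- ===== CLAIM (what is proved, stated in full; the proofs are below) =====
def Claim_equal_findCaptures : Prop := ∀ (columnList : List Int), Dom_findCaptures columnList → Pre_findCaptures columnList → Spec_findCaptures columnList (findCaptures columnList)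

-- ===== LEMMAS AND PROOFS =====

-- the per-new-column contribution both counting loops add when column x is appended to pre
def pvDelta (pre : List Int) (x : Int) : Int :=
  ((PySem.List.enumerate pre).map (fun p =>
      (if p.2 == x then (1 : Int) else 0)
    + (if p.2 - p.1 == x - (pre.length : Int) then (1 : Int) else 0)
    + (if p.2 + p.1 == x + (pre.length : Int) then (1 : Int) else 0))).sum

-- the per-(i, j) contribution of A's double loop
def pairBody (ys : List Int) (i j : Int) : Int :=
  (if PySem.List.pyGetD ys i 0 == PySem.List.pyGetD ys j 0 then (1:Int) else 0)
  + (if (PySem.List.pyGetD ys i 0 - PySem.List.pyGetD ys j 0 == i - j)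
        || (PySem.List.pyGetD ys i 0 - PySem.List.pyGetD ys j 0 == -(i - j)) then (1:Int) else 0)

lemma captureNum_eq_sum (ys : List Int) :
    captureNum ys = ((PySem.List.pyRange 0 ((ys.length:Int) - 1)).map (fun i =>
      ((PySem.List.pyRange (i+1) (ys.length:Int)).map (pairBody ys i)).sum)).sum := by
  unfold captureNum
  rw [PySem.List.foldl_congr_mem _ _
      (fun cap i => cap + ((PySem.List.pyRange (i+1) (ys.length:Int)).map (pairBody ys i)).sum) _ ?_]
  · rw [PySem.List.foldl_add]; ring
  · intro acc i _
    rw [PySem.List.foldl_congr_mem _ _ (fun cap j => cap + pairBody ys i j) _ ?_]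
    · rw [PySem.List.foldl_add]
    · intro cap j _
      simp only [pairBody]
      split_ifs <;> ring

lemma pyGetD_append_lt (xs ys : List Int) (d : Int) (i : Int) (h0 : 0 ≤ i) (h1 : i < (xs.length : Int)) :
    PySem.List.pyGetD (xs ++ ys) i d = PySem.List.pyGetD xs i d := by
  rw [PySem.List.pyGetD_eq_getElem _ d h0 (by simp; omega),
      PySem.List.pyGetD_eq_getElem _ d h0 (by omega)]
  exact List.getElem_append_left (by omega)

lemma pyGetD_append_last (xs : List Int) (x d : Int) :
    PySem.List.pyGetD (xs ++ [x]) (xs.length : Int) d = x := by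
  rw [PySem.List.pyGetD_eq_getElem _ d (by positivity) (by simp)]
  simp

lemma captureNum_append (xs : List Int) (x : Int) :
    captureNum (xs ++ [x]) = captureNum xs + pvDelta xs x := by
  rw [captureNum_eq_sum, captureNum_eq_sum]
  have hlen : ((xs ++ [x]).length : Int) = (xs.length : Int) + 1 := by simp
  rw [hlen]
  set n : Int := (xs.length : Int) with hn
  -- extend captureNum xs's outer range from [0, n-1) to [0, n)
  have hext : ((PySem.List.pyRange 0 (n - 1)).map (fun i =>
        ((PySem.List.pyRange (i+1) n).map (pairBody xs i)).sum)).sum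
      = ((PySem.List.pyRange 0 n).map (fun i =>
        ((PySem.List.pyRange (i+1) n).map (pairBody xs i)).sum)).sum := by
    by_cases h : n ≤ 0
    · rw [PySem.List.pyRange_one_eq_nil (by omega), PySem.List.pyRange_one_eq_nil (by omega)]
    · have : n = (n - 1) + 1 := by ring
      rw [this, PySem.List.pyRange_one_succ_right (by omega)]
      simp only [List.map_append, List.sum_append, List.map_cons, List.map_nil,
        List.sum_cons, List.sum_nil]
      rw [show (n-1) + 1 = n by ring, PySem.List.pyRange_one_eq_nil (le_refl n)]
      simp
  rw [hext, show (n + 1 : Int) - 1 = n by ring]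
  -- rewrite each outer term of the (xs ++ [x]) sum
  rw [List.map_congr_left (g := fun i =>
      ((PySem.List.pyRange (i+1) n).map (pairBody xs i)).sum + pairBody (xs ++ [x]) i n) ?_]
  · rw [PySem.List.sum_map_add_int]
    congr 1
    -- ∑_{i ∈ [0,n)} pairBody (xs++[x]) i n = pvDelta xs x
    unfold pvDelta
    rw [PySem.List.enumerate_eq_map_pyRange xs 0, List.map_map]
    have hlen' : PySem.List.len xs = n := rfl
    rw [hlen']
    congr 1
    refine List.map_congr_left ?_
    intro a ha
    rw [PySem.List.mem_pyRange_one] at ha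
    simp only [Function.comp]
    unfold pairBody
    rw [pyGetD_append_lt xs [x] 0 a ha.1 ha.2]
    rw [show PySem.List.pyGetD (xs ++ [x]) n 0 = x from pyGetD_append_last xs x 0]
    simp only [beq_iff_eq, Bool.or_eq_true]
    split_ifs <;> omega
  · intro i hi
    rw [PySem.List.mem_pyRange_one] at hi
    rw [PySem.List.pyRange_one_succ_right (by omega)]
    simp only [List.map_append, List.sum_append, List.map_cons, List.map_nil, List.sum_cons,
      List.sum_nil, add_zero]
    congr 2
    refine List.map_congr_left ?_
    intro j hj
    rw [PySem.List.mem_pyRange_one] at hj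
    unfold pairBody
    rw [pyGetD_append_lt xs [x] 0 i hi.1 hi.2, pyGetD_append_lt xs [x] 0 j (by omega) (by omega)]

lemma foldl_pair_fst {α σ τ : Type} (l : List α) (f : σ → α → σ) (g : σ × τ → α → τ) (s : σ) (t : τ) :
    (l.foldl (fun st p => (f st.1 p, g st p)) (s, t)).1 = l.foldl f s := by
  induction l generalizing s t with
  | nil => rfl
  | cons a l ih => simpa using ih (f s a) (g (s, t) a)

lemma pairCount_state_fst (xs : List Int) :
    ((PySem.List.enumerate xs).foldl
      (fun (st : (PySem.Dict Int Int × PySem.Dict Int Int × PySem.Dict Int Int) × Int) p =>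
        ((st.1.1.insert p.2 (st.1.1.getD p.2 0 + 1),
          st.1.2.1.insert (p.2 - p.1) (st.1.2.1.getD (p.2 - p.1) 0 + 1),
          st.1.2.2.insert (p.2 + p.1) (st.1.2.2.getD (p.2 + p.1) 0 + 1)),
         st.2 + st.1.1.getD p.2 0 + st.1.2.1.getD (p.2 - p.1) 0 + st.1.2.2.getD (p.2 + p.1) 0))
      ((PySem.Dict.empty, PySem.Dict.empty, PySem.Dict.empty), 0)).1
    = (((PySem.List.enumerate xs).map (fun p => p.2)).foldl (fun d x => d.insert x (d.getD x 0 + 1)) PySem.Dict.empty,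
       ((PySem.List.enumerate xs).map (fun p => p.2 - p.1)).foldl (fun d x => d.insert x (d.getD x 0 + 1)) PySem.Dict.empty,
       ((PySem.List.enumerate xs).map (fun p => p.2 + p.1)).foldl (fun d x => d.insert x (d.getD x 0 + 1)) PySem.Dict.empty) := by
  refine (foldl_pair_fst (PySem.List.enumerate xs)
      (fun (ds : PySem.Dict Int Int × PySem.Dict Int Int × PySem.Dict Int Int) (p : Int × Int) =>
        (ds.1.insert p.2 (ds.1.getD p.2 0 + 1),
         ds.2.1.insert (p.2 - p.1) (ds.2.1.getD (p.2 - p.1) 0 + 1),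
         ds.2.2.insert (p.2 + p.1) (ds.2.2.getD (p.2 + p.1) 0 + 1)))
      (fun (st : (PySem.Dict Int Int × PySem.Dict Int Int × PySem.Dict Int Int) × Int) (p : Int × Int) => st.2 + st.1.1.getD p.2 0 + st.1.2.1.getD (p.2 - p.1) 0 + st.1.2.2.getD (p.2 + p.1) 0)
      (PySem.Dict.empty, PySem.Dict.empty, PySem.Dict.empty) (0 : Int)).trans ?_
  refine (PySem.List.foldl_prod_mk
      (fun (d : PySem.Dict Int Int) (p : Int × Int) => d.insert p.2 (d.getD p.2 0 + 1))
      (fun (ds : PySem.Dict Int Int × PySem.Dict Int Int) (p : Int × Int) =>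
        (ds.1.insert (p.2 - p.1) (ds.1.getD (p.2 - p.1) 0 + 1),
         ds.2.insert (p.2 + p.1) (ds.2.getD (p.2 + p.1) 0 + 1)))
      (PySem.List.enumerate xs) PySem.Dict.empty (PySem.Dict.empty, PySem.Dict.empty)).trans ?_
  refine Prod.ext ?_ ?_
  · exact (List.foldl_map (f := fun (p : Int × Int) => p.2)
      (g := fun (d : PySem.Dict Int Int) x => d.insert x (d.getD x 0 + 1))
      (l := PySem.List.enumerate xs) (init := PySem.Dict.empty)).symm
  refine (PySem.List.foldl_prod_mk
      (fun (d : PySem.Dict Int Int) (p : Int × Int) => d.insert (p.2 - p.1) (d.getD (p.2 - p.1) 0 + 1))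
      (fun (d : PySem.Dict Int Int) (p : Int × Int) => d.insert (p.2 + p.1) (d.getD (p.2 + p.1) 0 + 1))
      (PySem.List.enumerate xs) PySem.Dict.empty PySem.Dict.empty).trans ?_
  refine Prod.ext ?_ ?_
  · exact (List.foldl_map (f := fun (p : Int × Int) => p.2 - p.1)
      (g := fun (d : PySem.Dict Int Int) x => d.insert x (d.getD x 0 + 1))
      (l := PySem.List.enumerate xs) (init := PySem.Dict.empty)).symm
  · exact (List.foldl_map (f := fun (p : Int × Int) => p.2 + p.1)
      (g := fun (d : PySem.Dict Int Int) x => d.insert x (d.getD x 0 + 1))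
      (l := PySem.List.enumerate xs) (init := PySem.Dict.empty)).symm

lemma pairCount_append (xs : List Int) (x : Int) :
    pairCount (xs ++ [x]) = pairCount xs + pvDelta xs x := by
  unfold pairCount
  rw [PySem.List.enumerate_append, List.foldl_append]
  rw [show PySem.List.enumerate [x] (0 + (xs.length : Int)) = [((xs.length : Int), x)] by
    simp [PySem.List.enumerate]]
  rw [List.foldl_cons, List.foldl_nil]
  rw [pairCount_state_fst]
  simp only [PySem.Dict.getD_foldl_insert_add_one, PySem.Dict.getD_empty,
    List.count_eq_countP, List.countP_map]
  unfold pvDelta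
  rw [PySem.List.sum_map_add_int (f := fun p : Int × Int =>
        (if p.2 == x then (1:Int) else 0) + (if p.2 - p.1 == x - (xs.length : Int) then (1:Int) else 0))
      (g := fun p : Int × Int => if p.2 + p.1 == x + (xs.length : Int) then (1:Int) else 0),
      PySem.List.sum_map_add_int (f := fun p : Int × Int => if p.2 == x then (1:Int) else 0)
      (g := fun p : Int × Int => if p.2 - p.1 == x - (xs.length : Int) then (1:Int) else 0)]
  rw [PySem.List.sum_map_ite_one_zero (fun p : Int × Int => p.2 == x),
      PySem.List.sum_map_ite_one_zero (fun p : Int × Int => p.2 - p.1 == x - (xs.length : Int)),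
      PySem.List.sum_map_ite_one_zero (fun p : Int × Int => p.2 + p.1 == x + (xs.length : Int))]
  simp only [zero_add]
  ring_nf
  rfl

lemma captureNum_eq_pairCount (xs : List Int) : captureNum xs = pairCount xs := by
  induction xs using List.reverseRecOn with
  | nil => decide
  | append_singleton ys y ih => rw [captureNum_append, pairCount_append, ih]

lemma inner_inv (φ : List Int → Int) (xs : List Int) (m : Int) (hm0 : 0 ≤ m) (hm8 : m < 8)
    (hlen : 8 ≤ xs.length) :
    ∀ (j k : Nat), k + j = 8 → ∀ (v : Int), (v = PySem.List.pyGetD xs m 0 ∨ v ≤ (k : Int)) →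
    ∀ (cl : List (List Int)),
    ∃ w : Int,
      (PySem.List.pyRange (k : Int) 8).foldl (fun (st : List (List Int) × List Int) n =>
          if PySem.List.pyGetD xs m 0 == n + 1 then
            (st.1.set m.toNat ((PySem.List.pyGetD st.1 m []).set n.toNat (φ xs)), st.2)
          else if !(PySem.List.pyGetD st.2 m 0 == n + 1) then
            (st.1.set m.toNat ((PySem.List.pyGetD st.1 m []).set n.toNat (φ (st.2.set m.toNat (n + 1)))),
             st.2.set m.toNat (n + 1))
          else st)
        (cl, xs.set m.toNat v)
      = ((PySem.List.pyRange (k : Int) 8).foldl (fun c n =>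
          c.set m.toNat ((PySem.List.pyGetD c m []).set n.toNat (φ (xs.set m.toNat (n + 1))))) cl,
         xs.set m.toNat w) := by
  have hmlen : m < (xs.length : Int) := by omega
  have hmt : m.toNat < xs.length := by omega
  intro j
  induction j with
  | zero =>
    intro k hk v hv cl
    refine ⟨v, ?_⟩
    rw [PySem.List.pyRange_one_eq_nil (by omega)]
    rfl
  | succ j ih =>
    intro k hk v hv cl
    have hklt : (k : Int) < 8 := by omega
    rw [PySem.List.pyRange_one_cons hklt, List.foldl_cons, List.foldl_cons]
    have hcast : ((k : Int) + 1) = ((k + 1 : Nat) : Int) := by push_cast; ring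
    rw [hcast]
    by_cases hb : PySem.List.pyGetD xs m 0 = ((k + 1 : Nat) : Int)
    · have hset : xs.set m.toNat ((k + 1 : Nat) : Int) = xs := by
        rw [show (((k + 1 : Nat) : Int)) = xs[m.toNat] by
          rw [← PySem.List.pyGetD_eq_getElem xs 0 hm0 hmlen, hb]]
        exact List.set_getElem_self (h := hmt)
      rw [if_pos (by simp [hb])]
      have hφ : φ (xs.set m.toNat ((k + 1 : Nat) : Int)) = φ xs := by rw [hset]
      rw [hφ]
      have hv' : v = PySem.List.pyGetD xs m 0 ∨ v ≤ ((k + 1 : Nat) : Int) := by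
        rcases hv with h | h
        · exact Or.inl h
        · right; push_cast; omega
      exact ih (k + 1) (by omega) v hv' _
    · rw [if_neg (by simpa using hb)]
      have hgv : PySem.List.pyGetD (xs.set m.toNat v) m 0 = v := by
        rw [PySem.List.pyGetD_eq_getElem _ 0 hm0 (by simpa using hmlen)]
        exact List.getElem_set_self (by simpa using hmt)
      have hvne : v ≠ ((k + 1 : Nat) : Int) := by
        rcases hv with h | h
        · rw [h]; exact hb
        · push_cast; omega
      rw [if_pos (by simp [hgv]; omega)]
      simp only [List.set_set]
      have hv' : (((k + 1 : Nat) : Int)) = PySem.List.pyGetD xs m 0 ∨ (((k + 1 : Nat) : Int)) ≤ ((k + 1 : Nat) : Int) :=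
        Or.inr le_rfl
      exact ih (k + 1) (by omega) _ hv' _

-- ===== VERDICT (by name: the statement is the Claim_ definition above) =====
theorem findCaptures_spec : Claim_equal_findCaptures := by
  intro xs _hdom hpre
  unfold Pre_findCaptures at hpre
  unfold Spec_findCaptures findCaptures
  have hcp : captureNum = pairCount := funext captureNum_eq_pairCount
  simp only [hcp]
  rw [PySem.List.foldl_congr_mem _ _ (fun (CL : List (List Int)) m =>
      (PySem.List.pyRange (0 : Int) 8).foldl (fun c n =>
        c.set m.toNat ((PySem.List.pyGetD c m []).set n.toNat (pairCount (xs.set m.toNat (n + 1))))) CL) _ ?_]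
  · unfold findCaptures_alt movedAt
    simp [show PySem.List.pyRange (0:Int) 8 = [0,1,2,3,4,5,6,7] from by decide,
      List.foldl_cons, List.foldl_nil, PySem.List.pyGetD_of_nonneg]
  · intro CL m hm
    rw [PySem.List.mem_pyRange_one] at hm
    have hxs : xs = xs.set m.toNat (PySem.List.pyGetD xs m 0) := by
      rw [PySem.List.pyGetD_eq_getElem xs 0 hm.1 (by omega)]
      exact (List.set_getElem_self (h := by omega)).symm
    obtain ⟨w, hw⟩ := inner_inv pairCount xs m hm.1 hm.2 hpre 8 0 rfl
      (PySem.List.pyGetD xs m 0) (Or.inl rfl) CL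
    have h2 : ((CL, xs) : List (List Int) × List Int)
        = (CL, xs.set m.toNat (PySem.List.pyGetD xs m 0)) := by rw [← hxs]
    rw [show ((0 : Nat) : Int) = (0 : Int) from rfl] at hw
    rw [h2, hw]
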